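-- pv_equiv track=rewrite | github.com/dongseoplee/coding-test-practice | samsung_SW.py | calculate
-- ===== SOURCE A (Python) =====
-- def calculate(matrix, calType):
--     sorted_matrix = []
--     max_count = 0
--     for i in range(len(matrix)):
--         temp = []
--         dic = dict()
--         for j in range(len(matrix[i])):
--             if matrix[i][j] != 0:
--                 if matrix[i][j] not in dic:
--                     dic[matrix[i][j]] = 1
--                 else:
--                     dic[matrix[i][j]] += 1
--
--         for key, value in dic.items():
--             temp.append([key, value])
--         temp.sort(key=lambda x: [x[1], x[0]])
--         C = sum(temp, [])
--         max_count = max(max_count, len(C))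
--         sorted_matrix.append(C)
--     for m in sorted_matrix:
--         m += [0] * (max_count-len(m))
--         if len(m) > 100:
--             m = m[:100]
--
--     if calType == 'C':
--         return list(zip(*sorted_matrix))
--     else:
--         return sorted_matrix
-- ===== SOURCE B (Python) =====
-- def calculate(matrix, calType):
--     # Per row: sort the nonzero values and run-length-scan the sorted list into
--     # [value, count] pairs (no dict), then order pairs by (count, value) and flatten.
--     rows = []
--     for row in matrix:
--         vals = sorted(x for x in row if x != 0)
--         pairs = []
--         i = 0
--         while i < len(vals):
--             j = i + 1
--             while j < len(vals) and vals[j] == vals[i]: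
--                 j += 1
--             pairs.append([vals[i], j - i])
--             i = j
--         pairs.sort(key=lambda p: (p[1], p[0]))
--         rows.append([n for p in pairs for n in p])
--     width = 0
--     for r in rows:
--         width = max(width, len(r))
--     rows = [r + [0] * (width - len(r)) for r in rows]
--     return list(zip(*rows)) if calType == 'C' else rows
-- ===== Notes on version B (the rewrite author's own statement) =====
-- stated objective: faster
-- what changed: Replaces the per-row dict-based frequency counting with sorting the row's nonzero values and run-length scanning the sorted list into (value,count) pairs; width via a plain max-of-lengths pass, and the no-op len>100 rebinding is dropped.
import Mathlib
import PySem

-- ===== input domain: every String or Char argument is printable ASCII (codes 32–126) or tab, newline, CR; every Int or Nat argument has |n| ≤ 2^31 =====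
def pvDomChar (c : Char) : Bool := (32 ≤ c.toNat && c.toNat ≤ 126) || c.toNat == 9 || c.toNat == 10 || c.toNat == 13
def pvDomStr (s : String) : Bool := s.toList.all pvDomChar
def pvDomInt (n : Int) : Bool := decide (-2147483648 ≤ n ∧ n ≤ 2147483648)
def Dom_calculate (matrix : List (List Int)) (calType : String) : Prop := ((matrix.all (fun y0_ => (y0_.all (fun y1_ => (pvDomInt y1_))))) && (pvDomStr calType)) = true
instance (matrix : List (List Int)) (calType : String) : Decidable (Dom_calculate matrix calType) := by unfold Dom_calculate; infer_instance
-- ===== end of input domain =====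

-- B replaces A's per-row dict counting by sort + run-length scan (same return value; A mutates nothing observable).

-- shared helper: list(zip(*rows)) — both Pythons call zip; exact: truncates to the shortest row, zip() of no rows is []
def pyZipStar (ls : List (List Int)) : List (List Int) :=
  match ls with
  | [] => []
  | l :: rest =>
    let n := rest.foldl (fun m r => min m r.length) l.length
    (List.range n).map (fun i => (l :: rest).map (fun r => r.getD i 0))

-- ===== PORT A =====
def calculate (matrix : List (List Int)) (calType : String) : List (List Int) :=
  -- sorted_matrix, max_count accumulated in one pass, as in A
  let st := matrix.foldl (fun (acc : List (List Int) × Int) row =>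
    let dic := row.foldl (fun (d : PySem.Dict Int Int) x =>
      if x ≠ 0 then
        (if d.contains x = false then d.insert x 1 else d.insert x (d.getD x 0 + 1))
      else d) PySem.Dict.empty
    let temp := dic.items.foldl (fun t p => t ++ [p]) ([] : List (Int × Int))
    let temp2 := PySem.List.sorted2 temp (fun p => p.2) (fun p => p.1)   -- temp.sort(key=lambda x: [x[1], x[0]])
    let C := temp2.foldl (fun c p => c ++ [p.1, p.2]) ([] : List Int)    -- C = sum(temp, [])
    (acc.1 ++ [C], max acc.2 (C.length : Int))) ([], (0 : Int))
  -- padding loop; A's 'm = m[:100]' rebinds a local and never changes the stored list, so it has no effect on the result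
  let padded := st.1.map (fun m => m ++ PySem.List.pyRepeat [0] (st.2 - (m.length : Int)))
  if calType = "C" then pyZipStar padded else padded

-- ===== PORT B =====
-- run-length scan of vals: the while/while loop of Source B (inner while = takeWhile over the rest)
def rlePairs (vals : List Int) : List (Int × Int) :=
  match vals with
  | [] => []
  | v :: rest =>
    (v, (rest.takeWhile (fun y => y == v)).length + 1) ::
      rlePairs (rest.dropWhile (fun y => y == v))
termination_by vals.length
decreasing_by
  simpa using Nat.lt_succ_of_le (List.Sublist.length_le (List.dropWhile_sublist _))

def calculate_alt (matrix : List (List Int)) (calType : String) : List (List Int) :=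
  let rows := matrix.map (fun row =>
    let vals := PySem.List.sorted (row.filter (fun x => decide (x ≠ 0))) (fun x => x)
    let pairs := PySem.List.sorted2 (rlePairs vals) (fun p => p.2) (fun p => p.1)
    pairs.flatMap (fun p => [p.1, p.2]))
  let width := rows.foldl (fun w r => max w ((r.length : Int))) (0 : Int)
  let rows2 := rows.map (fun r => r ++ PySem.List.pyRepeat [0] (width - (r.length : Int)))
  if calType = "C" then pyZipStar rows2 else rows2

-- ===== PRECONDITION & SPEC =====
def Spec_calculate (matrix : List (List Int)) (calType : String) (out : List (List Int)) : Prop := out = calculate_alt matrix calType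
instance (matrix : List (List Int)) (calType : String) (out : List (List Int)) : Decidable (Spec_calculate matrix calType out) := by unfold Spec_calculate; infer_instance

-- ===== CLAIM (what is proved, stated in full; the proofs are below) =====
def Claim_equal_calculate : Prop := ∀ (matrix : List (List Int)) (calType : String), Dom_calculate matrix calType → Spec_calculate matrix calType (calculate matrix calType)

-- ===== LEMMAS AND PROOFS =====

-- Python's tuple key (p[1], p[0]) is the lexicographic order: sorted2 is sorted with a Lex key
theorem sorted2_eq_sorted_toLex (xs : List (Int × Int)) :
    PySem.List.sorted2 xs (fun p => p.2) (fun p => p.1) =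
    PySem.List.sorted xs (fun p => toLex (p.2, p.1)) := by
  rw [PySem.List.sorted_eq_foldl_insertBy]
  show List.foldl _ [] xs = _
  congr 1
  funext a x
  congr 1
  funext p q
  have : (toLex (p.2, p.1) < toLex (q.2, q.1)) ↔ (p.2 < q.2 ∨ p.2 = q.2 ∧ p.1 < q.1) :=
    Prod.Lex.toLex_lt_toLex
  by_cases h1 : p.2 < q.2 <;> by_cases h2 : q.2 < p.2 <;> by_cases h3 : p.1 < q.1 <;>
    simp [h1, h2, h3, this] <;> omega

theorem toLex_swap_injective : Function.Injective (fun p : Int × Int => toLex (p.2, p.1)) := by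
  intro p q h
  have h' : ((p.2, p.1) : Int × Int) = (q.2, q.1) := toLex.injective h
  have h1 := congrArg Prod.fst h'
  have h2 := congrArg Prod.snd h'
  simp at h1 h2
  exact Prod.ext h2 h1

-- in a ≤-sorted list, everything dropped past the leading run of v is strictly greater than v
theorem lt_of_mem_dropWhile_sorted (v : Int) (rest : List Int)
    (hs : (v :: rest).Pairwise (· ≤ ·)) :
    ∀ y ∈ rest.dropWhile (fun y => y == v), v < y := by
  intro y hy
  have hle : ∀ z ∈ rest, v ≤ z := (List.pairwise_cons.mp hs).1
  have hrest : rest.Pairwise (· ≤ ·) := (List.pairwise_cons.mp hs).2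
  have hd : (rest.dropWhile (fun y => y == v)).Pairwise (· ≤ ·) :=
    hrest.sublist (List.dropWhile_sublist _)
  cases hdw : rest.dropWhile (fun y => y == v) with
  | nil => rw [hdw] at hy; simp at hy
  | cons h t =>
    rw [hdw] at hy hd
    have hh : (h == v) = false := by
      have := List.head_dropWhile_not (fun y => y == v) (l := rest) (by rw [hdw]; simp)
      simpa [hdw] using this
    have hhne : h ≠ v := by simpa using hh
    have hhmem : h ∈ rest := (List.dropWhile_sublist _).mem (by rw [hdw]; exact List.mem_cons_self)
    have hvh : v < h := lt_of_le_of_ne (hle h hhmem) (Ne.symm hhne)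
    rcases List.mem_cons.mp hy with rfl | hyt
    · exact hvh
    · exact lt_of_lt_of_le hvh ((List.pairwise_cons.mp hd).1 y hyt)

-- membership characterisation of the run-length pairs of a sorted list
theorem rle_mem (s : List Int) (hs : s.Pairwise (· ≤ ·)) (w : Int) (c : Int) :
    (w, c) ∈ rlePairs s ↔ w ∈ s ∧ c = (s.count w : Int) := by
  induction s using rlePairs.induct with
  | case1 => simp [rlePairs]
  | case2 v rest ih =>
    have hcons : rlePairs (v :: rest)
        = (v, ((rest.takeWhile (fun y => y == v)).length : Int) + 1) ::
          rlePairs (rest.dropWhile (fun y => y == v)) := by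
      rw [rlePairs]
    have hlt := lt_of_mem_dropWhile_sorted v rest hs
    have hrest : rest.Pairwise (· ≤ ·) := (List.pairwise_cons.mp hs).2
    have hd : (rest.dropWhile (fun y => y == v)).Pairwise (· ≤ ·) :=
      hrest.sublist (List.dropWhile_sublist _)
    have hsplit : rest.takeWhile (fun y => y == v) ++ rest.dropWhile (fun y => y == v) = rest :=
      List.takeWhile_append_dropWhile
    have htake : ∀ y ∈ rest.takeWhile (fun y => y == v), y = v := by
      intro y hy
      have := List.mem_takeWhile_imp hy
      simpa using this
    have hvnotd : v ∉ rest.dropWhile (fun y => y == v) := fun hmem => lt_irrefl v (hlt v hmem)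
    have hcount_take : (rest.takeWhile (fun y => y == v)).count v
        = (rest.takeWhile (fun y => y == v)).length :=
      List.count_eq_length.mpr (fun b hb => (htake b hb).symm)
    have hc_rest : ∀ u : Int, rest.count u
        = (rest.takeWhile (fun y => y == v)).count u
          + (rest.dropWhile (fun y => y == v)).count u := by
      intro u
      conv_lhs => rw [← hsplit]
      rw [List.count_append]
    have hcv : ((v :: rest).count v : Int)
        = ((rest.takeWhile (fun y => y == v)).length : Int) + 1 := by
      rw [List.count_cons_self, hc_rest v, hcount_take, List.count_eq_zero.mpr hvnotd]
      push_cast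
      ring
    have hmemrest : ∀ u : Int, u ∈ rest.dropWhile (fun y => y == v) → u ∈ rest := by
      intro u hu
      exact (List.dropWhile_sublist _).mem hu
    rw [hcons]
    constructor
    · intro hmem
      rcases List.mem_cons.mp hmem with heq | hmem'
      · have hw : w = v := (Prod.mk.injEq _ _ _ _ ▸ heq).1
        have hc : c = ((rest.takeWhile (fun y => y == v)).length : Int) + 1 :=
          (Prod.mk.injEq _ _ _ _ ▸ heq).2
        subst hw
        exact ⟨List.mem_cons_self, by rw [hcv]; exact hc⟩
      · rcases (ih hd).mp hmem' with ⟨hwmem, hc⟩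
        have hwlt : v < w := hlt w hwmem
        have hwne : w ≠ v := fun h => by subst h; exact lt_irrefl _ hwlt
        have hwnot_take : w ∉ rest.takeWhile (fun y => y == v) := fun h => hwne (htake w h)
        refine ⟨List.mem_cons_of_mem _ (hmemrest w hwmem), ?_⟩
        rw [List.count_cons_of_ne (Ne.symm hwne), hc_rest w, List.count_eq_zero.mpr hwnot_take]
        push_cast
        simpa using hc
    · rintro ⟨hwmem, rfl⟩
      by_cases hw : w = v
      · subst hw
        exact List.mem_cons.mpr (Or.inl (by rw [hcv]))
      · have hwrest : w ∈ rest := by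
          rcases List.mem_cons.mp hwmem with h | h
          · exact absurd h hw
          · exact h
        have hwnot_take : w ∉ rest.takeWhile (fun y => y == v) := fun h => hw (htake w h)
        have hwd : w ∈ rest.dropWhile (fun y => y == v) := by
          have hsum : w ∈ rest.takeWhile (fun y => y == v) ++ rest.dropWhile (fun y => y == v) := by
            rw [hsplit]; exact hwrest
          rcases List.mem_append.mp hsum with h | h
          · exact absurd h hwnot_take
          · exact h
        apply List.mem_cons_of_mem
        apply (ih hd).mpr
        refine ⟨hwd, ?_⟩
        rw [List.count_cons_of_ne (Ne.symm hw), hc_rest w, List.count_eq_zero.mpr hwnot_take]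
        push_cast
        ring

-- first components of the run-length pairs of a sorted list are strictly increasing, hence Nodup pairs
theorem rle_fst_pairwise (s : List Int) (hs : s.Pairwise (· ≤ ·)) :
    (rlePairs s).Pairwise (fun p q => p.1 < q.1) := by
  induction s using rlePairs.induct with
  | case1 => simp [rlePairs]
  | case2 v rest ih =>
    have hlt := lt_of_mem_dropWhile_sorted v rest hs
    have hrest : rest.Pairwise (· ≤ ·) := (List.pairwise_cons.mp hs).2
    have hd : (rest.dropWhile (fun y => y == v)).Pairwise (· ≤ ·) :=
      hrest.sublist (List.dropWhile_sublist _)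
    have hcons : rlePairs (v :: rest)
        = (v, ((rest.takeWhile (fun y => y == v)).length : Int) + 1) ::
          rlePairs (rest.dropWhile (fun y => y == v)) := by
      rw [rlePairs]
    rw [hcons]
    apply List.pairwise_cons.mpr
    refine ⟨?_, ih hd⟩
    intro q hq
    have := (rle_mem _ hd q.1 q.2).mp (by simpa using hq)
    exact hlt q.1 this.1

theorem rle_nodup (s : List Int) (hs : s.Pairwise (· ≤ ·)) : (rlePairs s).Nodup :=
  (rle_fst_pairwise s hs).imp (fun h heq => by subst heq; exact lt_irrefl _ h)

-- A's counter items are a permutation of B's run-length pairs of the sorted list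
theorem counter_items_perm_rle (l : List Int) :
    (PySem.Dict.counter l).items.Perm
      (rlePairs (PySem.List.sorted l (fun x => x))) := by
  set s := PySem.List.sorted l (fun x => x) with hsdef
  have hperm : s.Perm l := PySem.List.sorted_perm l (fun x => x) false
  have hsorted : s.Pairwise (· ≤ ·) := PySem.List.sorted_pairwise l (fun x => x)
  rw [PySem.Dict.items_counter]
  have hnd1 : ((PySem.Set.ofList l).map (fun k => (k, (l.count k : Int)))).Nodup :=
    (PySem.Set.nodup_ofList l).map (fun a b h => (Prod.mk.injEq _ _ _ _ ▸ h).1)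
  apply (List.perm_ext_iff_of_nodup hnd1 (rle_nodup s hsorted)).mpr
  rintro ⟨w, c⟩
  rw [rle_mem s hsorted w c]
  constructor
  · intro h
    rcases List.mem_map.mp h with ⟨k, hk, hkeq⟩
    have hkw : k = w := (Prod.mk.injEq _ _ _ _ ▸ hkeq).1
    have hkc : (l.count k : Int) = c := (Prod.mk.injEq _ _ _ _ ▸ hkeq).2
    subst hkw
    refine ⟨hperm.mem_iff.mpr ((PySem.Set.mem_ofList l k).mp hk), ?_⟩
    rw [← hkc, hperm.count_eq]
  · rintro ⟨hmem, rfl⟩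
    apply List.mem_map.mpr
    refine ⟨w, (PySem.Set.mem_ofList l w).mpr (hperm.mem_iff.mp hmem), ?_⟩
    rw [hperm.count_eq]

-- per-row: A's dict pipeline and B's sort+scan pipeline produce the same flattened row
theorem row_eq (row : List Int) :
    (PySem.List.sorted2
        ((row.foldl (fun (d : PySem.Dict Int Int) x =>
          if x ≠ 0 then
            (if d.contains x = false then d.insert x 1 else d.insert x (d.getD x 0 + 1))
          else d) PySem.Dict.empty).items.foldl (fun t p => t ++ [p]) ([] : List (Int × Int)))
        (fun p => p.2) (fun p => p.1)).foldl (fun c p => c ++ [p.1, p.2]) ([] : List Int)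
    = (PySem.List.sorted2
        (rlePairs (PySem.List.sorted (row.filter (fun x => decide (x ≠ 0))) (fun x => x)))
        (fun p => p.2) (fun p => p.1)).flatMap (fun p => [p.1, p.2]) := by
  set nz := row.filter (fun x => decide (x ≠ 0)) with hnz
  have hdic : (row.foldl (fun (d : PySem.Dict Int Int) x =>
      if x ≠ 0 then
        (if d.contains x = false then d.insert x 1 else d.insert x (d.getD x 0 + 1))
      else d) PySem.Dict.empty) = PySem.Dict.counter nz := by
    have h1 := PySem.List.foldl_ite_eq_foldl_filter (fun x : Int => x ≠ 0)
      (fun (d : PySem.Dict Int Int) x =>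
        if d.contains x = false then d.insert x 1 else d.insert x (d.getD x 0 + 1))
      row PySem.Dict.empty
    rw [h1]
    have h2 := PySem.List.foldl_congr_mem nz
      (fun (d : PySem.Dict Int Int) x =>
        if d.contains x = false then d.insert x 1 else d.insert x (d.getD x 0 + 1))
      (fun (d : PySem.Dict Int Int) x => d.insert x (d.getD x 0 + 1)) PySem.Dict.empty ?_
    · rw [h2]
      exact PySem.Dict.foldl_insert_getD_add_one_eq_counter nz
    · intro d x _
      by_cases hc : d.contains x = false
      · have h0 : d.getD x 0 = 0 := PySem.Dict.getD_of_not_contains d 0 hc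
        simp [hc, h0]
      · simp [hc]
  rw [hdic, PySem.List.foldl_append_singleton_eq_self, List.nil_append]
  rw [PySem.List.foldl_append_eq_flatMap (fun p : Int × Int => [p.1, p.2]), List.nil_append]
  congr 1
  rw [sorted2_eq_sorted_toLex, sorted2_eq_sorted_toLex]
  exact PySem.List.sorted_eq_sorted_of_perm _ _ _ toLex_swap_injective (counter_items_perm_rle nz)

-- ===== VERDICT (by name: the statement is the Claim_ definition above) =====
theorem calculate_spec : Claim_equal_calculate := by
  intro matrix calType _
  show calculate matrix calType = calculate_alt matrix calType
  unfold calculate calculate_alt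
  dsimp only
  rw [PySem.List.foldl_prod_mk
    (fun a row =>
      a ++ [(PySem.List.sorted2
        ((row.foldl (fun (d : PySem.Dict Int Int) x =>
          if x ≠ 0 then
            (if d.contains x = false then d.insert x 1 else d.insert x (d.getD x 0 + 1))
          else d) PySem.Dict.empty).items.foldl (fun t p => t ++ [p]) ([] : List (Int × Int)))
        (fun p => p.2) (fun p => p.1)).foldl (fun c p => c ++ [p.1, p.2]) ([] : List Int)])
    (fun m row =>
      max m (((PySem.List.sorted2
        ((row.foldl (fun (d : PySem.Dict Int Int) x =>
          if x ≠ 0 then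
            (if d.contains x = false then d.insert x 1 else d.insert x (d.getD x 0 + 1))
          else d) PySem.Dict.empty).items.foldl (fun t p => t ++ [p]) ([] : List (Int × Int)))
        (fun p => p.2) (fun p => p.1)).foldl (fun c p => c ++ [p.1, p.2]) ([] : List Int)).length : Int))
    matrix [] 0]
  rw [PySem.List.foldl_append_singleton_eq_map, List.nil_append]
  have hmap : matrix.map (fun row =>
      (PySem.List.sorted2
        ((row.foldl (fun (d : PySem.Dict Int Int) x =>
          if x ≠ 0 then
            (if d.contains x = false then d.insert x 1 else d.insert x (d.getD x 0 + 1))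
          else d) PySem.Dict.empty).items.foldl (fun t p => t ++ [p]) ([] : List (Int × Int)))
        (fun p => p.2) (fun p => p.1)).foldl (fun c p => c ++ [p.1, p.2]) ([] : List Int))
    = matrix.map (fun row =>
      (PySem.List.sorted2
        (rlePairs (PySem.List.sorted (row.filter (fun x => decide (x ≠ 0))) (fun x => x)))
        (fun p => p.2) (fun p => p.1)).flatMap (fun p => [p.1, p.2])) :=
    List.map_congr_left (fun row _ => row_eq row)
  have hfold : matrix.foldl (fun m row =>
        max m (((PySem.List.sorted2
        ((row.foldl (fun (d : PySem.Dict Int Int) x =>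
          if x ≠ 0 then
            (if d.contains x = false then d.insert x 1 else d.insert x (d.getD x 0 + 1))
          else d) PySem.Dict.empty).items.foldl (fun t p => t ++ [p]) ([] : List (Int × Int)))
        (fun p => p.2) (fun p => p.1)).foldl (fun c p => c ++ [p.1, p.2]) ([] : List Int)).length : Int)) 0
      = List.foldl (fun w r => max w ((r.length : Int))) 0
          (matrix.map (fun row => (PySem.List.sorted2
        (rlePairs (PySem.List.sorted (row.filter (fun x => decide (x ≠ 0))) (fun x => x)))
        (fun p => p.2) (fun p => p.1)).flatMap (fun p => [p.1, p.2]))) := by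
    rw [List.foldl_map]
    exact PySem.List.foldl_congr_mem matrix _ _ 0 (fun acc row _ => by rw [row_eq row])
  rw [hmap, hfold]
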